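-- pv_equiv track=rewrite | github.com/49nn/ProveNuance2 | solver/engine.py | _find_neg_cycle_preds
-- ===== SOURCE A (Python) =====
-- def _find_neg_cycle_preds(
--     neg_deps: dict[str, set[str]],
--     all_deps: dict[str, set[str]],
--     preds:    set[str],
-- ) -> set[str]:
--     """
--     Znajduje predykaty należące do cyklu przechodzącego przez negację.
--
--     Cykl istnieje gdy p negatywnie zależy od q ORAZ q może dosięgnąć p
--     przez dowolne zależności (pozytywne lub negatywne).
--     """
--     # Oblicz domknięcie przechodnie przez wszystkie zależności
--     reachability: dict[str, set[str]] = {}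
--
--     def reachable(start: str) -> set[str]:
--         if start in reachability:
--             return reachability[start]
--         visited: set[str] = set()
--         stack = [start]
--         while stack:
--             node = stack.pop()
--             if node in visited:
--                 continue
--             visited.add(node)
--             stack.extend(all_deps.get(node, set()))
--         reachability[start] = visited
--         return visited
--
--     cycle_preds: set[str] = set()
--     for p in preds:
--         for q in neg_deps.get(p, set()):
--             if p in reachable(q):
--                 cycle_preds.add(p)
--                 cycle_preds.add(q)
--     return cycle_preds
-- ===== SOURCE B (Python) =====
-- def _find_neg_cycle_preds(
--     neg_deps: dict[str, set[str]],
--     all_deps: dict[str, set[str]],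
--     preds:    set[str],
-- ) -> set[str]:
--     """Level-synchronised BFS closure, computed once per negation target via a
--     precomputed table over the negative edges (instead of A's per-source
--     stack DFS with an on-the-fly memo)."""
--
--     def closure(start: str) -> set[str]:
--         reach = {start}
--         frontier = {start}
--         while frontier:
--             nxt: set[str] = set()
--             for n in frontier:
--                 nxt |= all_deps.get(n, set())
--             frontier = nxt - reach
--             reach |= frontier
--         return reach
--
--     edges = [(p, q) for p in preds for q in neg_deps.get(p, ())]
--     cache = {q: closure(q) for _, q in edges}
--     out: set[str] = set()
--     for p, q in edges:
--         if p in cache[q]: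
--             out.add(p)
--             out.add(q)
--     return out
-- ===== Notes on version B (the rewrite author's own statement) =====
-- stated objective: alternative
-- what changed: A explores each negation target with a stack-based DFS memoised in a reachability dict; B instead collects the negative-edge pairs once, computes each target's reachable set by a level-synchronised frontier BFS (set saturation per level), stores them in a precomputed table, and then runs one pure pass over the pairs.
import Mathlib
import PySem

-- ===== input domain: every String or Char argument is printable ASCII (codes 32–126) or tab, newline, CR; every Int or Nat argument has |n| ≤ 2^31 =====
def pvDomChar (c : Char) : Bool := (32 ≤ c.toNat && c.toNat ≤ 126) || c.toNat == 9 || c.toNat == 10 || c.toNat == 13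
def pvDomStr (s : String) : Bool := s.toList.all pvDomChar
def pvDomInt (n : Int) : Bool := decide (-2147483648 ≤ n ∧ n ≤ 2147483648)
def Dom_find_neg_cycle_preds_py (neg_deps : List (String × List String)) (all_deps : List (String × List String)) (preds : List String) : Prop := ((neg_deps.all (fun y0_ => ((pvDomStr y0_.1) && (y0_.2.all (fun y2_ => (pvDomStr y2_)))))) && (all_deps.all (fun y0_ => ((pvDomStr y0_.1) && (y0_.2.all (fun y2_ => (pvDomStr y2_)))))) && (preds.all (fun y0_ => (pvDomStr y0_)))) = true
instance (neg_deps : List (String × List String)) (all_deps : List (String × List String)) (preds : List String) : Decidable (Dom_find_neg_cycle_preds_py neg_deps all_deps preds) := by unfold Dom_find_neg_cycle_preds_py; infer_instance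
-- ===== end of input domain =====

-- B replaces A's per-source stack DFS with an on-the-fly memo by a level-synchronised BFS
-- closure precomputed into a table over the negative edges; same return value (a set,
-- order-independent here), similar cost — objective: alternative algorithm.

-- ===== PORT A =====

-- universe of nodes a search starting at `start` can ever touch: `start` plus every value string
-- of all_deps (used only to size the fuel that makes the loops total; sufficiency is proved below)
def pvUni (ad : PySem.Dict String (List String)) (start : String) : List String :=
  start :: ad.items.flatMap (fun kv => kv.2)

-- Python's `reachable`: worklist DFS (stack kept head-as-top, i.e. the reverse of Python's
-- list whose pops are from the end; visited is a set used only through membership, so the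
-- unmodelled hash iteration order of `stack.extend(set)` cannot affect any result below).
-- The fuel argument only makes the loop total; pvDfs supplies enough (proved in the lemmas).
def pvDfsGo (ad : PySem.Dict String (List String)) (fuel : Nat)
    (visited : PySem.Set String) (stack : List String) : PySem.Set String :=
  match fuel, stack with
  | _, [] => visited
  | 0, _ :: _ => visited
  | f + 1, node :: rest =>
    if node ∈ visited then pvDfsGo ad f visited rest
    else pvDfsGo ad f (PySem.Set.add visited node) ((ad.getD node []).reverse ++ rest)

def pvDfs (ad : PySem.Dict String (List String)) (start : String) : PySem.Set String :=
  pvDfsGo ad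
    ((pvUni ad start).length * ((ad.items.flatMap (fun kv => kv.2)).length + 1) + 1)
    PySem.Set.empty [start]

def pvReachable (ad : PySem.Dict String (List String))
    (memo : PySem.Dict String (List String)) (start : String) :
    List String × PySem.Dict String (List String) :=
  match memo.get? start with
  | some v => (v, memo)
  | none => (pvDfs ad start, memo.insert start (pvDfs ad start))

def find_neg_cycle_preds_py (neg_deps : List (String × List String)) (all_deps : List (String × List String)) (preds : List String) : List String :=
  (preds.foldl
    (fun (st : PySem.Dict String (List String) × PySem.Set String) p =>
      ((PySem.Dict.mk neg_deps).getD p []).foldl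
        (fun st q =>
          let rm := pvReachable (PySem.Dict.mk all_deps) st.1 q
          if p ∈ rm.1 then (rm.2, PySem.Set.add (PySem.Set.add st.2 p) q) else (rm.2, st.2))
        st)
    (PySem.Dict.empty, PySem.Set.empty)).2

-- ===== PORT B =====

-- B's `closure`: level-synchronised BFS (reach/frontier are sets used only through membership
-- and set algebra, so the unmodelled hash iteration order cannot affect any result below).
-- The fuel argument only makes the `while frontier` loop total; pvClosure supplies enough.
def pvBfsGo (ad : PySem.Dict String (List String)) (fuel : Nat)
    (reach frontier : PySem.Set String) : PySem.Set String :=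
  match fuel with
  | 0 => reach
  | f + 1 =>
    if frontier = [] then reach
    else
      let nxt := frontier.foldl (fun acc n => PySem.Set.union acc (ad.getD n [])) PySem.Set.empty
      let frontier' := PySem.Set.diff nxt reach
      let reach' := PySem.Set.union reach frontier'
      pvBfsGo ad f reach' frontier'

def pvClosure (ad : PySem.Dict String (List String)) (start : String) : PySem.Set String :=
  pvBfsGo ad ((pvUni ad start).length + 2) (PySem.Set.ofList [start]) (PySem.Set.ofList [start])

def find_neg_cycle_preds_py_alt (neg_deps : List (String × List String)) (all_deps : List (String × List String)) (preds : List String) : List String :=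
  let edges := preds.flatMap (fun p => ((PySem.Dict.mk neg_deps).getD p []).map (fun q => (p, q)))
  let cache := edges.foldl
    (fun (c : PySem.Dict String (List String)) e =>
      c.insert e.2 (pvClosure (PySem.Dict.mk all_deps) e.2)) PySem.Dict.empty
  -- cache[q]: a KeyError is impossible (every e.2 is a key of cache), so the lookup is ported as getD
  edges.foldl
    (fun out e => if e.1 ∈ cache.getD e.2 [] then PySem.Set.add (PySem.Set.add out e.1) e.2 else out)
    PySem.Set.empty

-- ===== PRECONDITION & SPEC =====
def Spec_find_neg_cycle_preds_py (neg_deps : List (String × List String)) (all_deps : List (String × List String)) (preds : List String) (out : List String) : Prop := out = find_neg_cycle_preds_py_alt neg_deps all_deps preds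
instance (neg_deps : List (String × List String)) (all_deps : List (String × List String)) (preds : List String) (out : List String) : Decidable (Spec_find_neg_cycle_preds_py neg_deps all_deps preds out) := by unfold Spec_find_neg_cycle_preds_py; infer_instance

-- ===== CLAIM (what is proved, stated in full; the proofs are below) =====
def Claim_equal_find_neg_cycle_preds_py : Prop := ∀ (neg_deps : List (String × List String)) (all_deps : List (String × List String)) (preds : List String), Dom_find_neg_cycle_preds_py neg_deps all_deps preds → Spec_find_neg_cycle_preds_py neg_deps all_deps preds (find_neg_cycle_preds_py neg_deps all_deps preds)

-- ===== LEMMAS AND PROOFS =====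

-- every dependency list is part of the flattened values
theorem pv_getD_sub (d : PySem.Dict String (List String)) (n : String) :
    ∀ x ∈ d.getD n [], x ∈ d.items.flatMap (fun kv => kv.2) := by
  obtain ⟨l⟩ := d
  induction l with
  | nil =>
    intro x hx
    rw [PySem.Dict.getD_eq_get?_getD,
      show ({ items := [] } : PySem.Dict String (List String)).get? n = none from rfl] at hx
    simp at hx
  | cons kv t ih =>
    intro x hx
    rw [PySem.Dict.getD_eq_get?_getD, PySem.Dict.get?_mk_cons] at hx
    by_cases h : kv.1 == n
    · simp [h] at hx
      exact List.mem_flatMap.2 ⟨kv, List.mem_cons_self .., hx⟩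
    · simp [h, ← PySem.Dict.getD_eq_get?_getD] at hx
      have := ih x hx
      simp only [List.flatMap_cons, List.mem_append]
      exact Or.inr this

theorem pv_getD_len (d : PySem.Dict String (List String)) (n : String) :
    (d.getD n []).length ≤ (d.items.flatMap (fun kv => kv.2)).length := by
  obtain ⟨l⟩ := d
  induction l with
  | nil =>
    rw [PySem.Dict.getD_eq_get?_getD,
      show ({ items := [] } : PySem.Dict String (List String)).get? n = none from rfl]
    simp
  | cons kv t ih =>
    rw [PySem.Dict.getD_eq_get?_getD, PySem.Dict.get?_mk_cons]
    by_cases h : kv.1 == n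
    · simp [h]
    · rw [if_neg h, ← PySem.Dict.getD_eq_get?_getD]
      simp only [List.flatMap_cons, List.length_append]
      have ih' : (({ items := t } : PySem.Dict String (List String)).getD n []).length ≤
          (t.flatMap (fun kv => kv.2)).length := by simpa using ih
      omega

theorem pv_filter_le {α : Type} (l : List α) (p q : α → Bool)
    (himp : ∀ x, q x = true → p x = true) :
    (l.filter q).length ≤ (l.filter p).length := by
  induction l with
  | nil => simp
  | cons b t ih =>
    by_cases hq : q b
    · simp [hq, himp b hq]; omega
    · by_cases hp : p b <;> simp [hq, hp] <;> omega

theorem pv_filter_lt {α : Type} (l : List α) (p q : α → Bool)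
    (himp : ∀ x, q x = true → p x = true) (a : α) (ha : a ∈ l)
    (hpa : p a = true) (hqa : q a = false) :
    (l.filter q).length < (l.filter p).length := by
  induction l with
  | nil => simp at ha
  | cons b t ih =>
    rcases List.mem_cons.1 ha with rfl | hat
    · have := pv_filter_le t p q himp
      simp [hpa, hqa]; omega
    · have h' := ih hat
      by_cases hq : q b
      · simp [hq, himp b hq]; omega
      · by_cases hp : p b <;> simp [hq, hp] <;> omega

theorem pv_nodup_le (l l' : List String) (h : l.Nodup) (hs : ∀ x ∈ l, x ∈ l') :
    l.length ≤ l'.length := by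
  have h1 : l.toFinset.card = l.length := List.toFinset_card_of_nodup h
  have h2 : l.toFinset ⊆ l'.toFinset := by
    intro x hx; simp only [List.mem_toFinset] at *; exact hs x hx
  have h3 := Finset.card_le_card h2
  have h4 := List.toFinset_card_le l'
  omega

-- membership / nodup of the per-level "nxt |= all_deps.get(n, set())" fold
theorem pv_mem_foldl_union (ad : PySem.Dict String (List String)) (fr : List String)
    (acc : PySem.Set String) (x : String) :
    x ∈ fr.foldl (fun acc n => PySem.Set.union acc (ad.getD n [])) acc ↔
      x ∈ acc ∨ ∃ n ∈ fr, x ∈ ad.getD n [] := by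
  induction fr generalizing acc with
  | nil => simp
  | cons b t ih =>
    simp only [List.foldl_cons, ih, PySem.Set.mem_union, List.mem_cons]
    constructor
    · rintro ((h | h) | ⟨n, hn, hx⟩)
      · exact Or.inl h
      · exact Or.inr ⟨b, Or.inl rfl, h⟩
      · exact Or.inr ⟨n, Or.inr hn, hx⟩
    · rintro (h | ⟨n, (rfl | hn), hx⟩)
      · exact Or.inl (Or.inl h)
      · exact Or.inl (Or.inr hx)
      · exact Or.inr ⟨n, hn, hx⟩

theorem pv_nodup_foldl_union (ad : PySem.Dict String (List String)) (fr : List String)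
    (acc : PySem.Set String) (h : acc.Nodup) :
    (fr.foldl (fun acc n => PySem.Set.union acc (ad.getD n [])) acc).Nodup := by
  induction fr generalizing acc with
  | nil => exact h
  | cons b t ih => exact ih _ (PySem.Set.nodup_union _ _ h)

-- the dependency edge relation; its reflexive-transitive closure is "can reach"
def pvEdge (ad : PySem.Dict String (List String)) (u v : String) : Prop :=
  v ∈ ad.getD u []

-- the DFS loop measure: unvisited-universe deficit (weighted) plus pending stack
def pvMu (ad : PySem.Dict String (List String)) (start : String)
    (visited : PySem.Set String) (stack : List String) : Nat :=
  ((pvUni ad start).filter (fun x => !(PySem.Set.contains visited x))).length *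
    ((ad.items.flatMap (fun kv => kv.2)).length + 1) + stack.length

-- unfolding equations for the loops
theorem pvDfsGo_stack_nil (ad : PySem.Dict String (List String)) (fuel : Nat)
    (visited : PySem.Set String) : pvDfsGo ad fuel visited [] = visited := by
  cases fuel <;> rfl

theorem pvDfsGo_succ_cons (ad : PySem.Dict String (List String)) (f : Nat)
    (visited : PySem.Set String) (node : String) (rest : List String) :
    pvDfsGo ad (f + 1) visited (node :: rest)
      = if node ∈ visited then pvDfsGo ad f visited rest
        else pvDfsGo ad f (PySem.Set.add visited node) ((ad.getD node []).reverse ++ rest) := rfl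

theorem pvBfsGo_frontier_nil (ad : PySem.Dict String (List String)) (fuel : Nat)
    (reach : PySem.Set String) : pvBfsGo ad fuel reach [] = reach := by
  cases fuel with
  | zero => rfl
  | succ f => simp [pvBfsGo]

theorem pvBfsGo_succ_ne (ad : PySem.Dict String (List String)) (f : Nat)
    (reach frontier : PySem.Set String) (h : ¬ frontier = []) :
    pvBfsGo ad (f + 1) reach frontier
      = pvBfsGo ad f
          (PySem.Set.union reach (PySem.Set.diff
            (frontier.foldl (fun acc n => PySem.Set.union acc (ad.getD n [])) PySem.Set.empty)
            reach))
          (PySem.Set.diff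
            (frontier.foldl (fun acc n => PySem.Set.union acc (ad.getD n [])) PySem.Set.empty)
            reach) := by
  simp [pvBfsGo, h]

-- the measure strictly drops when an unvisited node is expanded
theorem pvMu_step (ad : PySem.Dict String (List String)) (start : String)
    (visited : PySem.Set String) (node : String) (rest : List String)
    (hnode : node ∈ pvUni ad start) (hnv : node ∉ visited) :
    pvMu ad start (PySem.Set.add visited node) ((ad.getD node []).reverse ++ rest)
      < pvMu ad start visited (node :: rest) := by
  have himp : ∀ x, (!(PySem.Set.contains (PySem.Set.add visited node) x)) = true →
      (!(PySem.Set.contains visited x)) = true := by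
    intro x hx
    simp only [Bool.not_eq_true', ← Bool.not_eq_true] at hx ⊢
    intro hc
    exact hx ((PySem.Set.contains_iff _ x).2
      ((PySem.Set.mem_add _ _ _).2 (Or.inl ((PySem.Set.contains_iff visited x).1 hc))))
  have hlt := pv_filter_lt (pvUni ad start) _ _ himp node hnode
    (by simp only [Bool.not_eq_true', ← Bool.not_eq_true]
        intro hc; exact hnv ((PySem.Set.contains_iff _ _).1 hc))
    (by simp)
  have hlen := pv_getD_len ad node
  simp only [pvMu, List.length_append, List.length_reverse, List.length_cons]
  set E := (ad.items.flatMap (fun kv => kv.2)).length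
  set A := ((pvUni ad start).filter (fun x => !(PySem.Set.contains visited x))).length
  set B := ((pvUni ad start).filter
    (fun x => !(PySem.Set.contains (PySem.Set.add visited node) x))).length
  have hmul : (B + 1) * (E + 1) ≤ A * (E + 1) := Nat.mul_le_mul_right _ hlt
  have h2 : B * (E + 1) + (E + 1) = (B + 1) * (E + 1) := by ring
  omega

-- A's DFS: soundness, growth, closedness (given enough fuel)
theorem pvDfsGo_sound (ad : PySem.Dict String (List String)) (start : String) (fuel : Nat) :
    ∀ (visited : PySem.Set String) (stack : List String),
    (∀ x ∈ visited, Relation.ReflTransGen (pvEdge ad) start x) →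
    (∀ x ∈ stack, Relation.ReflTransGen (pvEdge ad) start x) →
    ∀ x ∈ pvDfsGo ad fuel visited stack, Relation.ReflTransGen (pvEdge ad) start x := by
  induction fuel with
  | zero =>
    intro visited stack hv _ x hx
    cases stack <;> exact hv x hx
  | succ f ih =>
    intro visited stack hv hst x hx
    cases stack with
    | nil => exact hv x (by rwa [pvDfsGo_stack_nil] at hx)
    | cons node rest =>
      rw [pvDfsGo_succ_cons] at hx
      by_cases hmem : node ∈ visited
      · rw [if_pos hmem] at hx
        exact ih visited rest hv (fun y hy => hst y (List.mem_cons_of_mem _ hy)) x hx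
      · rw [if_neg hmem] at hx
        refine ih _ _ (fun y hy => ?_) (fun y hy => ?_) x hx
        · rcases (PySem.Set.mem_add _ _ _).1 hy with h | rfl
          · exact hv y h
          · exact hst y (List.mem_cons_self ..)
        · rcases List.mem_append.1 hy with h | h
          · exact Relation.ReflTransGen.tail (hst node (List.mem_cons_self ..))
              (List.mem_reverse.1 h)
          · exact hst y (List.mem_cons_of_mem _ h)

theorem pvDfsGo_super_vis (ad : PySem.Dict String (List String)) (fuel : Nat) :
    ∀ (visited : PySem.Set String) (stack : List String),
    ∀ x ∈ visited, x ∈ pvDfsGo ad fuel visited stack := by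
  induction fuel with
  | zero => intro visited stack x hx; cases stack <;> exact hx
  | succ f ih =>
    intro visited stack x hx
    cases stack with
    | nil => rwa [pvDfsGo_stack_nil]
    | cons node rest =>
      rw [pvDfsGo_succ_cons]
      by_cases hmem : node ∈ visited
      · rw [if_pos hmem]; exact ih visited rest x hx
      · rw [if_neg hmem]
        exact ih _ _ x ((PySem.Set.mem_add _ _ _).2 (Or.inl hx))

theorem pvDfsGo_super_stack (ad : PySem.Dict String (List String)) (start : String) (fuel : Nat) :
    ∀ (visited : PySem.Set String) (stack : List String),
    (∀ x ∈ stack, x ∈ pvUni ad start) → pvMu ad start visited stack ≤ fuel →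
    ∀ x ∈ stack, x ∈ pvDfsGo ad fuel visited stack := by
  induction fuel with
  | zero =>
    intro visited stack _ hmu x hx
    exfalso
    have : stack.length = 0 := by simp only [pvMu] at hmu; omega
    rw [List.length_eq_zero_iff.1 this] at hx
    simp at hx
  | succ f ih =>
    intro visited stack hs hmu x hx
    cases stack with
    | nil => simp at hx
    | cons node rest =>
      rw [pvDfsGo_succ_cons]
      by_cases hmem : node ∈ visited
      · rw [if_pos hmem]
        rcases List.mem_cons.1 hx with rfl | hx'
        · exact pvDfsGo_super_vis ad f visited rest x hmem
        · refine ih visited rest (fun y hy => hs y (List.mem_cons_of_mem _ hy)) ?_ x hx'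
          simp only [pvMu, List.length_cons] at hmu ⊢; omega
      · rw [if_neg hmem]
        have hstep := pvMu_step ad start visited node rest (hs node (List.mem_cons_self ..)) hmem
        have hs' : ∀ y ∈ (ad.getD node []).reverse ++ rest, y ∈ pvUni ad start := by
          intro y hy
          rcases List.mem_append.1 hy with h | h
          · exact List.mem_cons_of_mem _ (pv_getD_sub ad node y (List.mem_reverse.1 h))
          · exact hs y (List.mem_cons_of_mem _ h)
        rcases List.mem_cons.1 hx with rfl | hx'
        · exact pvDfsGo_super_vis ad f _ _ x ((PySem.Set.mem_add _ _ _).2 (Or.inr rfl))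
        · exact ih _ _ hs' (by omega) x (List.mem_append.2 (Or.inr hx'))

theorem pvDfsGo_closed (ad : PySem.Dict String (List String)) (start : String) (fuel : Nat) :
    ∀ (visited : PySem.Set String) (stack : List String),
    (∀ x ∈ stack, x ∈ pvUni ad start) → pvMu ad start visited stack ≤ fuel →
    (∀ x ∈ visited, ∀ y ∈ ad.getD x [], y ∈ visited ∨ y ∈ stack) →
    ∀ x ∈ pvDfsGo ad fuel visited stack, ∀ y ∈ ad.getD x [],
      y ∈ pvDfsGo ad fuel visited stack := by
  induction fuel with
  | zero =>
    intro visited stack _ hmu hcl x hx y hy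
    have : stack.length = 0 := by simp only [pvMu] at hmu; omega
    have hnil := List.length_eq_zero_iff.1 this
    subst hnil
    rw [pvDfsGo_stack_nil] at hx ⊢
    rcases hcl x hx y hy with h | h
    · exact h
    · simp at h
  | succ f ih =>
    intro visited stack hs hmu hcl x hx y hy
    cases stack with
    | nil =>
      rw [pvDfsGo_stack_nil] at hx ⊢
      rcases hcl x hx y hy with h | h
      · exact h
      · simp at h
    | cons node rest =>
      rw [pvDfsGo_succ_cons] at hx ⊢
      by_cases hmem : node ∈ visited
      · rw [if_pos hmem] at hx ⊢
        refine ih visited rest (fun z hz => hs z (List.mem_cons_of_mem _ hz))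
          (by simp only [pvMu, List.length_cons] at hmu ⊢; omega)
          (fun z hz w hw => ?_) x hx y hy
        rcases hcl z hz w hw with h | h
        · exact Or.inl h
        · rcases List.mem_cons.1 h with rfl | h'
          · exact Or.inl hmem
          · exact Or.inr h'
      · rw [if_neg hmem] at hx ⊢
        have hstep := pvMu_step ad start visited node rest (hs node (List.mem_cons_self ..)) hmem
        have hs' : ∀ z ∈ (ad.getD node []).reverse ++ rest, z ∈ pvUni ad start := by
          intro z hz
          rcases List.mem_append.1 hz with h | h
          · exact List.mem_cons_of_mem _ (pv_getD_sub ad node z (List.mem_reverse.1 h))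
          · exact hs z (List.mem_cons_of_mem _ h)
        refine ih _ _ hs' (by omega) (fun z hz w hw => ?_) x hx y hy
        rcases (PySem.Set.mem_add _ _ _).1 hz with h | rfl
        · rcases hcl z h w hw with h' | h'
          · exact Or.inl ((PySem.Set.mem_add _ _ _).2 (Or.inl h'))
          · rcases List.mem_cons.1 h' with rfl | h''
            · exact Or.inl ((PySem.Set.mem_add _ _ _).2 (Or.inr rfl))
            · exact Or.inr (List.mem_append.2 (Or.inr h''))
        · exact Or.inr (List.mem_append.2 (Or.inl (List.mem_reverse.2 hw)))

-- A's search computes exactly the reachable set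
theorem pv_mem_pvDfs (ad : PySem.Dict String (List String)) (s x : String) :
    x ∈ pvDfs ad s ↔ Relation.ReflTransGen (pvEdge ad) s x := by
  unfold pvDfs
  have hs0 : ∀ z ∈ [s], z ∈ pvUni ad s := by
    intro z hz; rcases List.mem_singleton.1 hz with rfl; exact List.mem_cons_self ..
  have hmu0 : pvMu ad s PySem.Set.empty [s]
      ≤ (pvUni ad s).length * ((ad.items.flatMap (fun kv => kv.2)).length + 1) + 1 := by
    simp [pvMu, PySem.Set.empty]
  constructor
  · intro hx
    refine pvDfsGo_sound ad s _ PySem.Set.empty [s] (fun y hy => ?_) (fun y hy => ?_) x hx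
    · simp [PySem.Set.empty] at hy
    · rcases List.mem_singleton.1 hy with rfl; exact Relation.ReflTransGen.refl
  · intro h
    induction h with
    | refl =>
      exact pvDfsGo_super_stack ad s _ PySem.Set.empty [s] hs0 hmu0 s (List.mem_singleton.2 rfl)
    | tail h1 h2 ih =>
      exact pvDfsGo_closed ad s _ PySem.Set.empty [s] hs0 hmu0
        (fun y hy => by simp [PySem.Set.empty] at hy) _ ih _ h2

-- B's BFS: soundness, growth, closedness (given enough fuel)
theorem pvBfsGo_sound (ad : PySem.Dict String (List String)) (start : String) (fuel : Nat) :
    ∀ (reach frontier : PySem.Set String),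
    (∀ x ∈ reach, Relation.ReflTransGen (pvEdge ad) start x) →
    (∀ x ∈ frontier, Relation.ReflTransGen (pvEdge ad) start x) →
    ∀ x ∈ pvBfsGo ad fuel reach frontier, Relation.ReflTransGen (pvEdge ad) start x := by
  induction fuel with
  | zero => intro reach frontier hr _ x hx; exact hr x hx
  | succ f ih =>
    intro reach frontier hr hfr x hx
    by_cases hne : frontier = []
    · subst hne; rw [pvBfsGo_frontier_nil] at hx; exact hr x hx
    · rw [pvBfsGo_succ_ne ad f reach frontier hne] at hx
      have hfr' : ∀ y ∈ PySem.Set.diff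
          (frontier.foldl (fun acc n => PySem.Set.union acc (ad.getD n [])) PySem.Set.empty)
          reach, Relation.ReflTransGen (pvEdge ad) start y := by
        intro y hy
        have := ((PySem.Set.mem_diff _ _ _).1 hy).1
        rcases (pv_mem_foldl_union ad frontier PySem.Set.empty y).1 this with h0 | ⟨n, hn, hyn⟩
        · simp [PySem.Set.empty] at h0
        · exact Relation.ReflTransGen.tail (hfr n hn) hyn
      refine ih _ _ (fun y hy => ?_) hfr' x hx
      rcases (PySem.Set.mem_union _ _ _).1 hy with h | h
      · exact hr y h
      · exact hfr' y h

theorem pvBfsGo_super (ad : PySem.Dict String (List String)) (fuel : Nat) :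
    ∀ (reach frontier : PySem.Set String), ∀ x ∈ reach, x ∈ pvBfsGo ad fuel reach frontier := by
  induction fuel with
  | zero => intro reach frontier x hx; exact hx
  | succ f ih =>
    intro reach frontier x hx
    by_cases hne : frontier = []
    · subst hne; rwa [pvBfsGo_frontier_nil]
    · rw [pvBfsGo_succ_ne ad f reach frontier hne]
      exact ih _ _ x ((PySem.Set.mem_union _ _ _).2 (Or.inl hx))

theorem pvBfsGo_closed (ad : PySem.Dict String (List String)) (start : String) (fuel : Nat) :
    ∀ (reach frontier : PySem.Set String),
    reach.Nodup → (∀ x ∈ reach, x ∈ pvUni ad start) →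
    ((pvUni ad start).length + 1 - reach.length) + 1 ≤ fuel →
    (∀ x ∈ reach, x ∈ frontier ∨ ∀ y ∈ ad.getD x [], y ∈ reach) →
    ∀ x ∈ pvBfsGo ad fuel reach frontier, ∀ y ∈ ad.getD x [],
      y ∈ pvBfsGo ad fuel reach frontier := by
  induction fuel with
  | zero => intro reach frontier _ hsub hmu; omega
  | succ f ih =>
    intro reach frontier hnd hsub hmu hP x hx y hy
    by_cases hne : frontier = []
    · subst hne
      rw [pvBfsGo_frontier_nil] at hx ⊢
      rcases hP x hx with h | h
      · simp at h
      · exact h y hy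
    · rw [pvBfsGo_succ_ne ad f reach frontier hne] at hx ⊢
      set nxt := frontier.foldl (fun acc n => PySem.Set.union acc (ad.getD n [])) PySem.Set.empty
        with hnxt
      set fr' := PySem.Set.diff nxt reach with hfr'
      have hndf : fr'.Nodup :=
        PySem.Set.nodup_diff _ _ (pv_nodup_foldl_union ad frontier PySem.Set.empty List.nodup_nil)
      have hdisj : ∀ z ∈ fr', z ∉ reach := fun z hz => ((PySem.Set.mem_diff _ _ _).1 hz).2
      have happ : PySem.Set.union reach fr' = reach ++ fr' :=
        PySem.Set.update_eq_append_of_disjoint _ _ hndf hdisj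
      have hsub' : ∀ z ∈ PySem.Set.union reach fr', z ∈ pvUni ad start := by
        intro z hz
        rcases (PySem.Set.mem_union _ _ _).1 hz with h | h
        · exact hsub z h
        · have := ((PySem.Set.mem_diff _ _ _).1 h).1
          rcases (pv_mem_foldl_union ad frontier PySem.Set.empty z).1 this with h0 | ⟨n, _, hzn⟩
          · simp [PySem.Set.empty] at h0
          · exact List.mem_cons_of_mem _ (pv_getD_sub ad n z hzn)
      have hnd' : (PySem.Set.union reach fr').Nodup := PySem.Set.nodup_update _ _ hnd
      have hP' : ∀ z ∈ PySem.Set.union reach fr',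
          z ∈ fr' ∨ ∀ w ∈ ad.getD z [], w ∈ PySem.Set.union reach fr' := by
        intro z hz
        rcases (PySem.Set.mem_union _ _ _).1 hz with hzr | hzf
        · rcases hP z hzr with hzfr | hdeps
          · refine Or.inr (fun w hw => ?_)
            have hwnxt : w ∈ nxt :=
              (pv_mem_foldl_union ad frontier PySem.Set.empty w).2 (Or.inr ⟨z, hzfr, hw⟩)
            by_cases hwr : w ∈ reach
            · exact (PySem.Set.mem_union _ _ _).2 (Or.inl hwr)
            · exact (PySem.Set.mem_union _ _ _).2
                (Or.inr ((PySem.Set.mem_diff _ _ _).2 ⟨hwnxt, hwr⟩))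
          · exact Or.inr (fun w hw =>
              (PySem.Set.mem_union _ _ _).2 (Or.inl (hdeps w hw)))
        · exact Or.inl hzf
      by_cases hfe : fr' = []
      · rw [hfe] at hx ⊢
        rw [pvBfsGo_frontier_nil] at hx ⊢
        rcases hP' x (by rwa [hfe]) with h | h
        · rw [hfe] at h; simp at h
        · have := h y hy
          rw [hfe] at this
          rcases (PySem.Set.mem_union _ _ _).1 this with h' | h'
          · exact h'
          · simp at h'
      · have hgrow : reach.length + 1 ≤ (PySem.Set.union reach fr').length := by
          rw [happ]
          have := List.length_pos_iff.2 hfe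
          simp only [List.length_append]
          omega
        have hbound : reach.length ≤ (pvUni ad start).length := pv_nodup_le reach _ hnd hsub
        exact ih _ _ hnd' hsub' (by omega) hP' x hx y hy

-- B's search computes exactly the reachable set
theorem pv_mem_pvClosure (ad : PySem.Dict String (List String)) (s x : String) :
    x ∈ pvClosure ad s ↔ Relation.ReflTransGen (pvEdge ad) s x := by
  unfold pvClosure
  constructor
  · intro hx
    refine pvBfsGo_sound ad s _ _ _ (fun y hy => ?_) (fun y hy => ?_) x hx <;>
      · rcases List.mem_singleton.1 ((PySem.Set.mem_ofList _ _).1 hy) with rfl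
        exact Relation.ReflTransGen.refl
  · intro h
    induction h with
    | refl =>
      exact pvBfsGo_super ad _ _ _ s ((PySem.Set.mem_ofList _ _).2 (List.mem_singleton.2 rfl))
    | tail h1 h2 ih =>
      refine pvBfsGo_closed ad s _ _ _ (PySem.Set.nodup_ofList _) (fun y hy => ?_) ?_
        (fun y hy => Or.inl hy) _ ih _ h2
      · rcases List.mem_singleton.1 ((PySem.Set.mem_ofList _ _).1 hy) with rfl
        exact List.mem_cons_self ..
      · have : (PySem.Set.ofList [s] : PySem.Set String).length = 1 := rfl
        omega

-- A's memo dict: every stored entry is the DFS result of its key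
def pvMemoOK (ad m : PySem.Dict String (List String)) : Prop :=
  ∀ k v, m.get? k = some v → v = pvDfs ad k

theorem pvReachable_fst (ad m : PySem.Dict String (List String)) (q : String)
    (h : pvMemoOK ad m) : (pvReachable ad m q).1 = pvDfs ad q := by
  unfold pvReachable
  cases hm : m.get? q with
  | none => simp
  | some v => simpa using h q v hm

theorem pvReachable_snd (ad m : PySem.Dict String (List String)) (q : String)
    (h : pvMemoOK ad m) : pvMemoOK ad (pvReachable ad m q).2 := by
  unfold pvReachable
  cases hm : m.get? q with
  | none =>
    intro k v hk
    simp only [PySem.Dict.get?_insert] at hk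
    by_cases hkq : k = q
    · rw [if_pos hkq] at hk; rw [hkq]; exact (Option.some_inj.1 hk).symm
    · rw [if_neg hkq] at hk; exact h k v hk
  | some v => simpa using h

-- A's nested loop with the memo threaded through equals the memo-free pure loop
theorem pvA_inner (ad : PySem.Dict String (List String)) (p : String) (qs : List String)
    (m : PySem.Dict String (List String)) (out : PySem.Set String) (h : pvMemoOK ad m) :
    (qs.foldl (fun st q =>
        if p ∈ (pvReachable ad st.1 q).1
        then ((pvReachable ad st.1 q).2, PySem.Set.add (PySem.Set.add st.2 p) q)
        else ((pvReachable ad st.1 q).2, st.2)) (m, out)).2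
      = qs.foldl (fun out q =>
          if p ∈ pvDfs ad q then PySem.Set.add (PySem.Set.add out p) q else out) out
    ∧ pvMemoOK ad ((qs.foldl (fun st q =>
        if p ∈ (pvReachable ad st.1 q).1
        then ((pvReachable ad st.1 q).2, PySem.Set.add (PySem.Set.add st.2 p) q)
        else ((pvReachable ad st.1 q).2, st.2)) (m, out)).1) := by
  induction qs generalizing m out with
  | nil => exact ⟨rfl, h⟩
  | cons q t ih =>
    have h1 := pvReachable_fst ad m q h
    have h2 := pvReachable_snd ad m q h
    simp only [List.foldl_cons, h1]
    by_cases hc : p ∈ pvDfs ad q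
    · rw [if_pos hc, if_pos hc]; exact ih _ _ h2
    · rw [if_neg hc, if_neg hc]; exact ih _ _ h2

theorem pvA_outer (ad nd : PySem.Dict String (List String)) (ps : List String)
    (m : PySem.Dict String (List String)) (out : PySem.Set String) (h : pvMemoOK ad m) :
    (ps.foldl (fun st p =>
        (nd.getD p []).foldl (fun st q =>
          if p ∈ (pvReachable ad st.1 q).1
          then ((pvReachable ad st.1 q).2, PySem.Set.add (PySem.Set.add st.2 p) q)
          else ((pvReachable ad st.1 q).2, st.2)) st)
      (m, out)).2
      = ps.foldl (fun out p =>
          (nd.getD p []).foldl (fun out q =>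
            if p ∈ pvDfs ad q then PySem.Set.add (PySem.Set.add out p) q else out) out) out := by
  induction ps generalizing m out with
  | nil => rfl
  | cons p t ih =>
    simp only [List.foldl_cons]
    obtain ⟨h1, h2⟩ := pvA_inner ad p (nd.getD p []) m out h
    have hX : ((nd.getD p []).foldl (fun st q =>
          if p ∈ (pvReachable ad st.1 q).1
          then ((pvReachable ad st.1 q).2, PySem.Set.add (PySem.Set.add st.2 p) q)
          else ((pvReachable ad st.1 q).2, st.2)) (m, out))
        = (((nd.getD p []).foldl (fun st q =>
          if p ∈ (pvReachable ad st.1 q).1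
          then ((pvReachable ad st.1 q).2, PySem.Set.add (PySem.Set.add st.2 p) q)
          else ((pvReachable ad st.1 q).2, st.2)) (m, out)).1,
          (nd.getD p []).foldl (fun out q =>
            if p ∈ pvDfs ad q then PySem.Set.add (PySem.Set.add out p) q else out) out) := by
      rw [← h1]
    rw [hX]
    exact ih _ _ h2

-- B's cache dict: every stored entry is the closure of its key, and every edge target is stored
theorem pvCacheOK (ad : PySem.Dict String (List String)) (l : List (String × String))
    (c : PySem.Dict String (List String))
    (h : ∀ k v, c.get? k = some v → v = pvClosure ad k) :
    ∀ k v, (l.foldl (fun c e => c.insert e.2 (pvClosure ad e.2)) c).get? k = some v →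
      v = pvClosure ad k := by
  induction l generalizing c with
  | nil => exact h
  | cons e t ih =>
    simp only [List.foldl_cons]
    refine ih _ (fun k v hk => ?_)
    simp only [PySem.Dict.get?_insert] at hk
    by_cases hke : k = e.2
    · rw [if_pos hke] at hk; rw [hke]; exact (Option.some_inj.1 hk).symm
    · rw [if_neg hke] at hk; exact h k v hk

theorem pvCacheMem (ad : PySem.Dict String (List String)) (l : List (String × String))
    (c : PySem.Dict String (List String)) (k : String)
    (h : ((c.get? k).isSome) = true) :
    (((l.foldl (fun c e => c.insert e.2 (pvClosure ad e.2)) c).get? k).isSome) = true := by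
  induction l generalizing c with
  | nil => exact h
  | cons e t ih =>
    simp only [List.foldl_cons]
    refine ih _ ?_
    simp only [PySem.Dict.get?_insert]
    by_cases hke : k = e.2
    · rw [if_pos hke]; rfl
    · rw [if_neg hke]; exact h

theorem pvCacheHit (ad : PySem.Dict String (List String)) (l : List (String × String))
    (c : PySem.Dict String (List String)) :
    ∀ e ∈ l,
      (((l.foldl (fun c e => c.insert e.2 (pvClosure ad e.2)) c).get? e.2).isSome) = true := by
  induction l generalizing c with
  | nil => intro e he; simp at he
  | cons a t ih =>
    intro e he
    rcases List.mem_cons.1 he with rfl | he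
    · simp only [List.foldl_cons]
      refine pvCacheMem ad t _ e.2 ?_
      rw [PySem.Dict.get?_insert_self]; rfl
    · exact ih _ e he

theorem pvCache_getD (ad : PySem.Dict String (List String)) (l : List (String × String)) :
    ∀ e ∈ l, (l.foldl (fun c e => c.insert e.2 (pvClosure ad e.2)) PySem.Dict.empty).getD e.2 []
      = pvClosure ad e.2 := by
  intro e he
  obtain ⟨v, hv⟩ := Option.isSome_iff_exists.1 (pvCacheHit ad l PySem.Dict.empty e he)
  have h2 := pvCacheOK ad l PySem.Dict.empty
    (fun k v hk => by rw [PySem.Dict.get?_empty] at hk; cases hk) e.2 v hv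
  rw [PySem.Dict.getD_eq_get?_getD, hv, h2]; rfl

-- ===== VERDICT (by name: the statement is the Claim_ definition above) =====
theorem find_neg_cycle_preds_py_spec : Claim_equal_find_neg_cycle_preds_py := by
  intro neg_deps all_deps preds _
  show (preds.foldl (fun (st : PySem.Dict String (List String) × PySem.Set String) p =>
      ((PySem.Dict.mk neg_deps).getD p []).foldl (fun st q =>
        if p ∈ (pvReachable (PySem.Dict.mk all_deps) st.1 q).1
        then ((pvReachable (PySem.Dict.mk all_deps) st.1 q).2,
          PySem.Set.add (PySem.Set.add st.2 p) q)
        else ((pvReachable (PySem.Dict.mk all_deps) st.1 q).2, st.2)) st)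
      (PySem.Dict.empty, PySem.Set.empty)).2
    = (preds.flatMap (fun p => ((PySem.Dict.mk neg_deps).getD p []).map (fun q => (p, q)))).foldl
        (fun out e =>
          if e.1 ∈ ((preds.flatMap
                (fun p => ((PySem.Dict.mk neg_deps).getD p []).map (fun q => (p, q)))).foldl
              (fun c e => c.insert e.2 (pvClosure (PySem.Dict.mk all_deps) e.2))
              PySem.Dict.empty).getD e.2 []
          then PySem.Set.add (PySem.Set.add out e.1) e.2 else out)
        PySem.Set.empty
  rw [pvA_outer (PySem.Dict.mk all_deps) (PySem.Dict.mk neg_deps) preds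
    PySem.Dict.empty PySem.Set.empty
    (fun k v hk => by rw [PySem.Dict.get?_empty] at hk; cases hk)]
  rw [PySem.List.foldl_congr_mem
    (preds.flatMap (fun p => ((PySem.Dict.mk neg_deps).getD p []).map (fun q => (p, q))))
    _
    (fun out (e : String × String) =>
      if e.1 ∈ pvDfs (PySem.Dict.mk all_deps) e.2
      then PySem.Set.add (PySem.Set.add out e.1) e.2 else out)
    PySem.Set.empty
    (fun acc e he => by
      rw [pvCache_getD (PySem.Dict.mk all_deps)
        (preds.flatMap (fun p => ((PySem.Dict.mk neg_deps).getD p []).map (fun q => (p, q))))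
        e he]
      exact if_congr ((pv_mem_pvClosure (PySem.Dict.mk all_deps) e.2 e.1).trans
        (pv_mem_pvDfs (PySem.Dict.mk all_deps) e.2 e.1).symm) rfl rfl)]
  rw [List.foldl_flatMap]
  simp only [List.foldl_map]
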